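-- pv_equiv track=rewrite | github.com/rafa-js/TuentiChallenge7 | ch9/src/ScalextricCircuitCreator.py | get_max_section_circuit
-- ===== SOURCE A (Python) =====
-- def get_max_section_circuit(pieces: tuple) -> int:
--     S, C, D = pieces[0], pieces[1], pieces[2]
--     if C <= 3:
--         return 0
--     if S + D == 0:
--         return 4
--     complex = (S > 1 or 0 < D < C) and C > 5
--     used = 0
--     C -= 4
--     used += 4
--     if complex:
--         if S < 2:
--             while C > 3:
--                 C -= 4
--                 used += 4
--         else:
--             while C > 1:
--                 C -= 2
--                 used += 2
--     while S > 3: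
--         S -= 2
--         used += 2
--     while D > 1:
--         D -= 2
--         used += 2
--     if S > 1 and D > 0:
--         S -= 2; D -= 1
--         used += 3
--     if S > 1:
--         S -= 2
--         used += 2
--     if D == 1 and complex:
--         D -= 1
--         used += 1
--     return used
-- ===== SOURCE B (Python) =====
-- def get_max_section_circuit(pieces: tuple) -> int:
--     # Closed-form arithmetic: every counting loop of the original is replaced
--     # by modular arithmetic (O(1) instead of O(S+C+D)).
--     S, C, D = pieces[0], pieces[1], pieces[2]
--     if C <= 3:
--         return 0
--     if S + D == 0:
--         return 4
--     cx = (S > 1 or 0 < D < C) and C > 5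
--     c = C - 4
--     used = 4 + ((c - c % 4 if S < 2 else c - c % 2) if cx else 0)
--     if S > 3:
--         used += S - 2 - S % 2
--         S = 2 + S % 2
--     if D > 1:
--         used += D - D % 2
--         D = D % 2
--     if S > 1 and D > 0:
--         S -= 2
--         D -= 1
--         used += 3
--     if S > 1:
--         used += 2
--     if D == 1 and cx:
--         used += 1
--     return used
-- ===== Notes on version B (the rewrite author's own statement) =====
-- stated objective: faster
-- what changed: Every counting while-loop (subtract 4 or 2 until a threshold) is replaced by a closed-form modular-arithmetic formula, so B does a constant number of integer operations.
import Mathlib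
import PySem

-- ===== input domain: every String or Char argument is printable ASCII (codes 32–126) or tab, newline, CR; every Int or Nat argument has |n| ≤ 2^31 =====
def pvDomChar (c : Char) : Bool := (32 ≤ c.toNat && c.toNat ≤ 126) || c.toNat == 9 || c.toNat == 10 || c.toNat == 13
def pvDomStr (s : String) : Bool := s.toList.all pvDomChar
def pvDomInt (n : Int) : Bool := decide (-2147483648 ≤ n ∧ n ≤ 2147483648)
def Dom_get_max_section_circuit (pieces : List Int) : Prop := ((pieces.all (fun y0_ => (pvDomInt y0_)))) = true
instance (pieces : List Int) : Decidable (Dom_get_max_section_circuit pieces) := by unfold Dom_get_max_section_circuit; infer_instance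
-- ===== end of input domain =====

-- B replaces A's counting while-loops by closed-form modular arithmetic (O(1) per call).

-- ===== PORT A =====
-- element access; Pre_ guarantees the index is in range, so the default is never used
def gmscGet (pieces : List Int) (i : Int) : Int := (PySem.List.pyGet? pieces i).getD 0

-- while C > 3: C -= 4; used += 4
def gmscLoop4 (c used : Int) : Int × Int :=
  if c > 3 then gmscLoop4 (c - 4) (used + 4) else (c, used)
termination_by (c - 3).toNat
decreasing_by omega

-- while x > 1: x -= 2; used += 2   (A's second C-loop and its D-loop have this exact shape)
def gmscLoop2 (x used : Int) : Int × Int :=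
  if x > 1 then gmscLoop2 (x - 2) (used + 2) else (x, used)
termination_by (x - 1).toNat
decreasing_by omega

-- while S > 3: S -= 2; used += 2
def gmscLoopS (s used : Int) : Int × Int :=
  if s > 3 then gmscLoopS (s - 2) (used + 2) else (s, used)
termination_by (s - 3).toNat
decreasing_by omega

def get_max_section_circuit (pieces : List Int) : Int :=
  let S := gmscGet pieces 0
  let C := gmscGet pieces 1
  let D := gmscGet pieces 2
  if C ≤ 3 then 0
  else if S + D = 0 then 4
  else
    let cx : Bool := decide ((S > 1 ∨ (0 < D ∧ D < C)) ∧ C > 5)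
    let used : Int := 4
    let C1 := C - 4
    let p1 := if cx then (if S < 2 then gmscLoop4 C1 used else gmscLoop2 C1 used) else (C1, used)
    let p2 := gmscLoopS S p1.2
    let p3 := gmscLoop2 D p2.2
    let S1 := p2.1
    let D1 := p3.1
    let q := if S1 > 1 ∧ D1 > 0 then (S1 - 2, D1 - 1, p3.2 + 3) else (S1, D1, p3.2)
    let u2 := if q.1 > 1 then q.2.2 + 2 else q.2.2
    if q.2.1 = 1 ∧ cx = true then u2 + 1 else u2

-- ===== PORT B =====
def get_max_section_circuit_alt (pieces : List Int) : Int :=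
  let S := gmscGet pieces 0
  let C := gmscGet pieces 1
  let D := gmscGet pieces 2
  if C ≤ 3 then 0
  else if S + D = 0 then 4
  else
    let cx : Bool := decide ((S > 1 ∨ (0 < D ∧ D < C)) ∧ C > 5)
    let c := C - 4
    let used : Int := 4 + (if cx then (if S < 2 then c - PySem.Int.mod c 4 else c - PySem.Int.mod c 2) else 0)
    let sq := if S > 3 then (2 + PySem.Int.mod S 2, used + S - 2 - PySem.Int.mod S 2) else (S, used)
    let dq := if D > 1 then (PySem.Int.mod D 2, sq.2 + D - PySem.Int.mod D 2) else (D, sq.2)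
    let S1 := sq.1
    let D1 := dq.1
    let q := if S1 > 1 ∧ D1 > 0 then (S1 - 2, D1 - 1, dq.2 + 3) else (S1, D1, dq.2)
    let u2 := if q.1 > 1 then q.2.2 + 2 else q.2.2
    if q.2.1 = 1 ∧ cx = true then u2 + 1 else u2

-- ===== PRECONDITION & SPEC =====
-- Pre_: Python A reads the first three elements and raises IndexError when fewer than three are given.
def Pre_get_max_section_circuit (pieces : List Int) : Prop := 3 ≤ pieces.length
instance (pieces : List Int) : Decidable (Pre_get_max_section_circuit pieces) := by unfold Pre_get_max_section_circuit; infer_instance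
def pvWitness_get_max_section_circuit : List Int := [1, 6, 1]

def Spec_get_max_section_circuit (pieces : List Int) (out : Int) : Prop := out = get_max_section_circuit_alt pieces
instance (pieces : List Int) (out : Int) : Decidable (Spec_get_max_section_circuit pieces out) := by unfold Spec_get_max_section_circuit; infer_instance

-- ===== CLAIM (what is proved, stated in full; the proofs are below) =====
def Claim_equal_get_max_section_circuit : Prop := ∀ (pieces : List Int), Dom_get_max_section_circuit pieces → Pre_get_max_section_circuit pieces → Spec_get_max_section_circuit pieces (get_max_section_circuit pieces)

-- ===== LEMMAS AND PROOFS =====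
set_option maxHeartbeats 8000000

-- closed form of the step-4 loop: final C is C % 4 (when it runs), used grows by C - C % 4
theorem gmscLoop4_eq (c used : Int) :
    gmscLoop4 c used =
      (if c > 3 then c % 4 else c, if c > 3 then used + (c - c % 4) else used) := by
  fun_induction gmscLoop4 c used with
  | case1 c used h ih =>
      rw [ih]
      have h4 : (c - 4) % 4 = c % 4 := by omega
      split_ifs with h2 <;> simp_all <;> omega
  | case2 c used h => simp [h]

-- closed form of the step-2, >1 loop
theorem gmscLoop2_eq (x used : Int) :
    gmscLoop2 x used =
      (if x > 1 then x % 2 else x, if x > 1 then used + (x - x % 2) else used) := by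
  fun_induction gmscLoop2 x used with
  | case1 x used h ih =>
      rw [ih]
      have h2 : (x - 2) % 2 = x % 2 := by omega
      split_ifs with hh <;> simp_all <;> omega
  | case2 x used h => simp [h]

-- closed form of the step-2, >3 loop
theorem gmscLoopS_eq (s used : Int) :
    gmscLoopS s used =
      (if s > 3 then 2 + s % 2 else s, if s > 3 then used + (s - 2 - s % 2) else used) := by
  fun_induction gmscLoopS s used with
  | case1 s used h ih =>
      rw [ih]
      have h2 : (s - 2) % 2 = s % 2 := by omega
      split_ifs with hh <;> simp_all <;> omega
  | case2 s used h => simp [h]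

-- ===== VERDICT (by name: the statement is the Claim_ definition above) =====
theorem get_max_section_circuit_spec : Claim_equal_get_max_section_circuit := by
  intro pieces _ _
  unfold Spec_get_max_section_circuit get_max_section_circuit get_max_section_circuit_alt
  set S := gmscGet pieces 0 with hS
  set C := gmscGet pieces 1 with hC
  set D := gmscGet pieces 2 with hD
  by_cases h1 : C ≤ 3
  · simp [h1]
  · simp only [if_neg h1]
    by_cases h2 : S + D = 0
    · simp [h2]
    · simp only [if_neg h2]
      have hm4 : PySem.Int.mod (C - 4) 4 = (C - 4) % 4 :=
        PySem.Int.mod_eq_emod_of_pos (by norm_num)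
      have hm2 : PySem.Int.mod (C - 4) 2 = (C - 4) % 2 :=
        PySem.Int.mod_eq_emod_of_pos (by norm_num)
      have hmS : PySem.Int.mod S 2 = S % 2 :=
        PySem.Int.mod_eq_emod_of_pos (by norm_num)
      have hmD : PySem.Int.mod D 2 = D % 2 :=
        PySem.Int.mod_eq_emod_of_pos (by norm_num)
      by_cases hcx : (S > 1 ∨ (0 < D ∧ D < C)) ∧ C > 5
      · rw [decide_eq_true hcx]
        simp only [gmscLoop4_eq, gmscLoop2_eq, gmscLoopS_eq, if_true]
        by_cases h43 : C - 4 > 3 <;> by_cases h21 : C - 4 > 1 <;>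
          by_cases hS2 : S < 2 <;> by_cases hS3 : S > 3 <;> by_cases hD1 : D > 1 <;>
          simp [h43, h21, hS2, hS3, hD1, hm4, hm2, hmS, hmD] <;>
          (try dsimp only) <;>
          first
            | omega
            | (split_ifs <;> (try dsimp only) <;> omega)
      · rw [decide_eq_false hcx]
        simp only [gmscLoop4_eq, gmscLoop2_eq, gmscLoopS_eq, Bool.false_eq_true, if_false]
        by_cases hS3 : S > 3 <;> by_cases hD1 : D > 1 <;>
          simp [hS3, hD1, hmS, hmD] <;>
          (try dsimp only) <;>
          first
            | omega
            | (split_ifs <;> (try dsimp only) <;> omega)
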